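-- pv_equiv track=rewrite | github.com/pypi-data/pypi-mirror-395 | packages/access-moppy/access_moppy-1.0.2a1-py3-none-any.whl/access_moppy/utilities.py | determine_resampling_method
-- ===== SOURCE A (Python) =====
-- def determine_resampling_method(
--     variable_name: str, variable_attrs: dict, cmip6_table: str = None
-- ) -> str:
--     """
--     Determine the appropriate temporal resampling method based on variable characteristics.
--
--     Args:
--         variable_name: Name of the variable (e.g., 'tas', 'pr', 'uas')
--         variable_attrs: Variable attributes dictionary from xarray
--         cmip6_table: CMIP6 table name for additional context
--
--     Returns:
--         Resampling method: 'mean', 'sum', 'min', 'max', 'first', 'last'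
--     """
--     # Get variable metadata
--     standard_name = variable_attrs.get("standard_name", "").lower()
--     long_name = variable_attrs.get("long_name", "").lower()
--     units = variable_attrs.get("units", "").lower()
--     cell_methods = variable_attrs.get("cell_methods", "").lower()
--     variable_lower = variable_name.lower()
--
--     # Check cell_methods for guidance first (highest priority)
--     if "time: sum" in cell_methods:
--         return "sum"
--     elif "time: mean" in cell_methods:
--         return "mean"
--     elif "time: maximum" in cell_methods:
--         return "max"
--     elif "time: minimum" in cell_methods:
--         return "min"
--
--     # Extreme variables (min/max depending on context)
--     if (
--         "maximum" in standard_name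
--         or "maximum" in long_name
--         or variable_lower.endswith("max")
--         or "tasmax" in variable_lower
--     ):
--         return "max"
--     if (
--         "minimum" in standard_name
--         or "minimum" in long_name
--         or variable_lower.endswith("min")
--         or "tasmin" in variable_lower
--     ):
--         return "min"
--
--     # Precipitation and flux variables (should be summed)
--     if any(
--         keyword in standard_name or keyword in long_name or keyword in variable_lower
--         for keyword in ["precipitation", "flux", "rate"]
--     ):
--         if "kg m-2 s-1" in units or "kg/m2/s" in units:
--             return "sum"  # Convert rate to total
--
--     # Temperature and intensive variables (should be averaged)
--     temperature_keywords = ["temperature", "pressure", "density", "concentration"]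
--     temperature_prefixes = ["tas", "ta", "ps", "psl", "hus", "hur"]
--
--     if any(
--         keyword in standard_name or keyword in long_name
--         for keyword in temperature_keywords
--     ) or any(variable_lower.startswith(prefix) for prefix in temperature_prefixes):
--         return "mean"
--
--     # Wind components (vector quantities - should be averaged)
--     wind_prefixes = ["uas", "vas", "ua", "va", "wap"]
--     if any(variable_lower.startswith(prefix) for prefix in wind_prefixes):
--         return "mean"
--
--     # Cloud and radiation variables (typically averaged)
--     cloud_keywords = ["cloud", "radiation", "albedo"]
--     cloud_prefixes = ["clt", "clw", "cli", "rsdt", "rsut", "rlut", "rsds", "rlds"]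
--
--     if any(
--         keyword in standard_name or keyword in long_name for keyword in cloud_keywords
--     ) or any(variable_lower.startswith(prefix) for prefix in cloud_prefixes):
--         return "mean"
--
--     # Default to mean for most variables
--     return "mean"
-- ===== SOURCE B (Python) =====
-- def determine_resampling_method(variable_name, variable_attrs, cmip6_table=None):
--     """Declarative re-implementation: the decision logic is a rule LIST of pure data
--     (method, CNF of (mode, field, pattern) atoms over named metadata fields),
--     interpreted by a tiny generic recursive engine; every branch of the original
--     decision tree after these seven rules returns 'mean', so 'mean' is the default."""
--     fields = {
--         "standard_name": variable_attrs.get("standard_name", "").lower(),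
--         "long_name": variable_attrs.get("long_name", "").lower(),
--         "units": variable_attrs.get("units", "").lower(),
--         "cell_methods": variable_attrs.get("cell_methods", "").lower(),
--         "variable": variable_name.lower(),
--     }
--
--     RULES = [
--         ("sum",  [[("in", "cell_methods", "time: sum")]]),
--         ("mean", [[("in", "cell_methods", "time: mean")]]),
--         ("max",  [[("in", "cell_methods", "time: maximum")]]),
--         ("min",  [[("in", "cell_methods", "time: minimum")]]),
--         ("max",  [[("in", "standard_name", "maximum"), ("in", "long_name", "maximum"),
--                    ("suffix", "variable", "max"), ("in", "variable", "tasmax")]]),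
--         ("min",  [[("in", "standard_name", "minimum"), ("in", "long_name", "minimum"),
--                    ("suffix", "variable", "min"), ("in", "variable", "tasmin")]]),
--         ("sum",  [[("in", f, kw) for kw in ("precipitation", "flux", "rate")
--                                  for f in ("standard_name", "long_name", "variable")],
--                   [("in", "units", "kg m-2 s-1"), ("in", "units", "kg/m2/s")]]),
--     ]
--
--     def atom_holds(atom):
--         mode, field, pattern = atom
--         text = fields[field]
--         return text.endswith(pattern) if mode == "suffix" else pattern in text
--
--     def first_match(rules):
--         if not rules:
--             return "mean"
--         method, cnf = rules[0]
--         if all(any(atom_holds(a) for a in clause) for clause in cnf):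
--             return method
--         return first_match(rules[1:])
--
--     return first_match(RULES)
-- ===== Notes on version B (the rewrite author's own statement) =====
-- stated objective: alternative
-- what changed: B reifies the decision logic as pure data -- an ordered rule list whose conditions are CNFs of (mode, field, pattern) atoms over a field dictionary -- evaluated by a small generic recursive interpreter with default 'mean', instead of A's hard-coded ten-branch if/elif chain; A's temperature/wind/cloud branches disappear because every branch after the seventh rule returns 'mean'.
import Mathlib
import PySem

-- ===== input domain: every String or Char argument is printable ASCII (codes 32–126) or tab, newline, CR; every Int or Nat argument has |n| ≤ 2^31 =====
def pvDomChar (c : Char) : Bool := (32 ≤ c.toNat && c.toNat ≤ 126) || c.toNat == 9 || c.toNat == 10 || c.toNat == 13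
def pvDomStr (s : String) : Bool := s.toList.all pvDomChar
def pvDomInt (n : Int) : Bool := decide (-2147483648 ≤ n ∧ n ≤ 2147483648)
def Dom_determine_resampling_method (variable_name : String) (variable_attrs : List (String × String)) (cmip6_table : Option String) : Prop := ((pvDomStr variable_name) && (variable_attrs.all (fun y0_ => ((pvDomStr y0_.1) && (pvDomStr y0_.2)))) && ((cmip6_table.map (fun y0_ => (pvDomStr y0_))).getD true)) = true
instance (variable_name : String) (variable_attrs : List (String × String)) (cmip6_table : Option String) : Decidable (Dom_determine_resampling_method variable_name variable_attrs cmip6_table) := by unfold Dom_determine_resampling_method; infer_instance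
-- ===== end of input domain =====

-- B replaces A's hard-coded if/elif decision tree by a declarative rule list
-- (method, CNF of (mode, field, pattern) atoms) run by a generic recursive
-- interpreter with default "mean"; same cost, an alternative decomposition.
-- ===== PORT A =====
-- dict.get(k, "") on the insertion-ordered association list: first match
def pvAGet (attrs : List (String × String)) (k : String) : String :=
  match attrs.find? (fun p => p.1 == k) with
  | some p => p.2
  | none => ""

def determine_resampling_method (variable_name : String) (variable_attrs : List (String × String)) (cmip6_table : Option String) : String :=
  let standard_name := PySem.Str.lower (pvAGet variable_attrs "standard_name")
  let long_name := PySem.Str.lower (pvAGet variable_attrs "long_name")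
  let units := PySem.Str.lower (pvAGet variable_attrs "units")
  let cell_methods := PySem.Str.lower (pvAGet variable_attrs "cell_methods")
  let variable_lower := PySem.Str.lower variable_name
  if PySem.Str.isIn "time: sum" cell_methods then "sum"
  else if PySem.Str.isIn "time: mean" cell_methods then "mean"
  else if PySem.Str.isIn "time: maximum" cell_methods then "max"
  else if PySem.Str.isIn "time: minimum" cell_methods then "min"
  else if PySem.Str.isIn "maximum" standard_name || PySem.Str.isIn "maximum" long_name
       || PySem.Str.endswith variable_lower "max" || PySem.Str.isIn "tasmax" variable_lower then "max"
  else if PySem.Str.isIn "minimum" standard_name || PySem.Str.isIn "minimum" long_name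
       || PySem.Str.endswith variable_lower "min" || PySem.Str.isIn "tasmin" variable_lower then "min"
  -- nested 'if any(...): if units…: return "sum"' — both failing branches fall through, so one conjunction
  else if (["precipitation", "flux", "rate"].any
            (fun kw => PySem.Str.isIn kw standard_name || PySem.Str.isIn kw long_name || PySem.Str.isIn kw variable_lower))
          && (PySem.Str.isIn "kg m-2 s-1" units || PySem.Str.isIn "kg/m2/s" units) then "sum"
  else if (["temperature", "pressure", "density", "concentration"].any
            (fun kw => PySem.Str.isIn kw standard_name || PySem.Str.isIn kw long_name))
          || (["tas", "ta", "ps", "psl", "hus", "hur"].any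
            (fun p => PySem.Str.startswith variable_lower p)) then "mean"
  else if (["uas", "vas", "ua", "va", "wap"].any
            (fun p => PySem.Str.startswith variable_lower p)) then "mean"
  else if (["cloud", "radiation", "albedo"].any
            (fun kw => PySem.Str.isIn kw standard_name || PySem.Str.isIn kw long_name))
          || (["clt", "clw", "cli", "rsdt", "rsut", "rlut", "rsds", "rlds"].any
            (fun p => PySem.Str.startswith variable_lower p)) then "mean"
  else "mean"

-- ===== PORT B =====
-- B: dict.get(k, "") on the association list
def pvBGet (attrs : List (String × String)) (k : String) : String :=
  match attrs.find? (fun p => p.1 == k) with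
  | some p => p.2
  | none => ""

-- fields[field]: the rule atoms only name the five keys built below, all present
def pvFieldsGet (fields : List (String × String)) (k : String) : String :=
  match fields.find? (fun p => p.1 == k) with
  | some p => p.2
  | none => ""

-- an atom is (mode, field, pattern); "suffix" → endswith, anything else → substring
def pvAtomHolds (fields : List (String × String)) (atom : String × String × String) : Bool :=
  let text := pvFieldsGet fields atom.2.1
  if atom.1 == "suffix" then PySem.Str.endswith text atom.2.2
  else PySem.Str.isIn atom.2.2 text

-- generic interpreter: first rule whose CNF holds wins, default "mean"
def pvFirstMatch (fields : List (String × String)) :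
    List (String × List (List (String × String × String))) → String
  | [] => "mean"
  | (method, cnf) :: rest =>
      if cnf.all (fun clause => clause.any (pvAtomHolds fields)) then method
      else pvFirstMatch fields rest

def determine_resampling_method_alt (variable_name : String) (variable_attrs : List (String × String)) (cmip6_table : Option String) : String :=
  let fields : List (String × String) :=
    [ ("standard_name", PySem.Str.lower (pvBGet variable_attrs "standard_name")),
      ("long_name", PySem.Str.lower (pvBGet variable_attrs "long_name")),
      ("units", PySem.Str.lower (pvBGet variable_attrs "units")),
      ("cell_methods", PySem.Str.lower (pvBGet variable_attrs "cell_methods")),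
      ("variable", PySem.Str.lower variable_name) ]
  let rules : List (String × List (List (String × String × String))) :=
    [ ("sum",  [[("in", "cell_methods", "time: sum")]]),
      ("mean", [[("in", "cell_methods", "time: mean")]]),
      ("max",  [[("in", "cell_methods", "time: maximum")]]),
      ("min",  [[("in", "cell_methods", "time: minimum")]]),
      ("max",  [[("in", "standard_name", "maximum"), ("in", "long_name", "maximum"),
                 ("suffix", "variable", "max"), ("in", "variable", "tasmax")]]),
      ("min",  [[("in", "standard_name", "minimum"), ("in", "long_name", "minimum"),
                 ("suffix", "variable", "min"), ("in", "variable", "tasmin")]]),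
      ("sum",  [[("in", "standard_name", "precipitation"), ("in", "long_name", "precipitation"), ("in", "variable", "precipitation"),
                 ("in", "standard_name", "flux"), ("in", "long_name", "flux"), ("in", "variable", "flux"),
                 ("in", "standard_name", "rate"), ("in", "long_name", "rate"), ("in", "variable", "rate")],
                [("in", "units", "kg m-2 s-1"), ("in", "units", "kg/m2/s")]]) ]
  pvFirstMatch fields rules

-- ===== PRECONDITION & SPEC =====
def Spec_determine_resampling_method (variable_name : String) (variable_attrs : List (String × String)) (cmip6_table : Option String) (out : String) : Prop := out = determine_resampling_method_alt variable_name variable_attrs cmip6_table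
instance (variable_name : String) (variable_attrs : List (String × String)) (cmip6_table : Option String) (out : String) : Decidable (Spec_determine_resampling_method variable_name variable_attrs cmip6_table out) := by unfold Spec_determine_resampling_method; infer_instance

-- ===== CLAIM (what is proved, stated in full; the proofs are below) =====
def Claim_equal_determine_resampling_method : Prop := ∀ (variable_name : String) (variable_attrs : List (String × String)) (cmip6_table : Option String), Dom_determine_resampling_method variable_name variable_attrs cmip6_table → Spec_determine_resampling_method variable_name variable_attrs cmip6_table (determine_resampling_method variable_name variable_attrs cmip6_table)

-- ===== LEMMAS AND PROOFS =====

-- A's ten-branch chain over its condition bools equals B's seven-rule engine result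
-- (whose rule conditions evaluate to the same bools): rules 8-10 all yield "mean"
theorem pv_chain_eq (b1 b2 b3 b4 b5 b6 b7 b8 b9 b10 : Bool) :
    (if b1 then "sum" else if b2 then "mean" else if b3 then "max" else if b4 then "min"
     else if b5 then "max" else if b6 then "min" else if b7 then "sum"
     else if b8 then "mean" else if b9 then "mean" else if b10 then "mean" else "mean")
    = (if b1 then "sum" else if b2 then "mean" else if b3 then "max" else if b4 then "min"
       else if b5 then "max" else if b6 then "min" else if b7 then "sum" else "mean") := by
  cases b1 <;> cases b2 <;> cases b3 <;> cases b4 <;> cases b5 <;> cases b6 <;> cases b7 <;>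
    cases b8 <;> cases b9 <;> cases b10 <;> rfl

-- ===== VERDICT (by name: the statement is the Claim_ definition above) =====
theorem determine_resampling_method_spec : Claim_equal_determine_resampling_method := by
  intro variable_name variable_attrs cmip6_table _
  unfold Spec_determine_resampling_method determine_resampling_method determine_resampling_method_alt pvAGet pvBGet
  simp only [pvFirstMatch, pvAtomHolds, pvFieldsGet, List.all_cons, List.all_nil, List.any_cons,
    List.any_nil, List.find?, Bool.or_false, Bool.and_true, Bool.or_assoc]
  exact pv_chain_eq _ _ _ _ _ _ _ _ _ _
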